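-- pv_equiv track=rewrite | github.com/aestream/faery | python/faery/cli/parser.py | parse_blocks_recursive
-- ===== SOURCE A (Python) =====
-- from typing import Dict, List, Optional, Set
--
-- def parse_blocks_recursive(
--     argv: List[str],
--     keywords: Set[str],
--     blocks: Dict[str, List[str]] = {},
--     current_block: Optional[str] = None,
--     filter_counter: int = 0,
-- ) -> Dict[str, List[str]]:
--     if len(argv) == 0:
--         return blocks
--
--     head = argv[0]
--     tail = argv[1:]
--
--     if head in keywords:
--         if head in blocks:
--             raise ValueError(f"Repeated keyword {head}")
--         if head == "filter":
--             current_block = f"{head}{filter_counter}"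
--             blocks[current_block] = []
--             return parse_blocks_recursive(
--                 tail,
--                 keywords=keywords,
--                 blocks=blocks,
--                 current_block=current_block,
--                 filter_counter=filter_counter + 1,
--             )
--         else:
--             blocks[head] = []
--             return parse_blocks_recursive(
--                 tail,
--                 keywords=keywords,
--                 blocks=blocks,
--                 current_block=head,
--                 filter_counter=filter_counter,
--             )
--     elif current_block is not None:
--         blocks[current_block].append(head)
--         return parse_blocks_recursive(
--             tail,
--             keywords=keywords,
--             blocks=blocks,
--             current_block=current_block,
--             filter_counter=filter_counter,
--         )
--     elif current_block is None and head == "--help":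
--         return {}
--     else:
--         raise ValueError(f"Unexpected argument {head}")
-- ===== SOURCE B (Python) =====
-- from typing import Dict, List, Optional, Set
--
-- def parse_blocks_recursive(
--     argv: List[str],
--     keywords: Set[str],
--     blocks: Dict[str, List[str]] = {},
--     current_block: Optional[str] = None,
--     filter_counter: int = 0,
-- ) -> Dict[str, List[str]]:
--     for head in argv:
--         if head in keywords:
--             if head in blocks:
--                 raise ValueError(f"Repeated keyword {head}")
--             if head == "filter":
--                 current_block = f"{head}{filter_counter}"
--                 filter_counter += 1
--             else:
--                 current_block = head
--             blocks[current_block] = []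
--         elif current_block is not None:
--             blocks[current_block].append(head)
--         elif head == "--help":
--             return {}
--         else:
--             raise ValueError(f"Unexpected argument {head}")
--     return blocks
-- ===== Notes on version B (the rewrite author's own statement) =====
-- stated objective: simpler
-- what changed: Replaces A's tail recursion (rebuilding the whole call each step) by a single flat for-loop over argv that updates current_block/filter_counter/blocks in place.
import Mathlib
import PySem

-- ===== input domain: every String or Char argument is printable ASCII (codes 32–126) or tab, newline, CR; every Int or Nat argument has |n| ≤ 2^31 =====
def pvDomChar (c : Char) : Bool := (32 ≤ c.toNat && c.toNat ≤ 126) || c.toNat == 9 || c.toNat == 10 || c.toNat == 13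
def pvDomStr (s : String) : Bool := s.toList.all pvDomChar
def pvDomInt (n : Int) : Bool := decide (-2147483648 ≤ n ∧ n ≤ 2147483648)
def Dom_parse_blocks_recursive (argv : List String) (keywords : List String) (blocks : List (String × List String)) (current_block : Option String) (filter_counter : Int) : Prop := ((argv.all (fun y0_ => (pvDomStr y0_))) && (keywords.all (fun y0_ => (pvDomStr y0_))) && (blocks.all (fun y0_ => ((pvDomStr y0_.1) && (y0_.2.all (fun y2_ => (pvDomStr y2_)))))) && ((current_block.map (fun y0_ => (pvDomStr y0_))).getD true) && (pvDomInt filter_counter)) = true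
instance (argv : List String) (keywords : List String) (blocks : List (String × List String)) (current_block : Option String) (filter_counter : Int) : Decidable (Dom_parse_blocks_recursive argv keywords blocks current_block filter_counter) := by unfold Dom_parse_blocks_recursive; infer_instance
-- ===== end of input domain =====

-- B replaces A's tail recursion by a single iterative pass over argv (same mutable state);
-- equivalence is about the return value (both A and B mutate `blocks` in place identically).

-- shared dict primitives (Python dict assignment / append on an insertion-ordered dict)
def pbrInsert (d : List (String × List String)) (k : String) (v : List String) :
    List (String × List String) :=
  if d.any (fun p => p.1 = k) then d.map (fun p => if p.1 = k then (k, v) else p)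
  else d ++ [(k, v)]

def pbrAppend (d : List (String × List String)) (k : String) (x : String) :
    List (String × List String) :=
  d.map (fun p => if p.1 = k then (p.1, p.2 ++ [x]) else p)

-- ===== PORT A =====
-- literal port of A's recursion; at each Python `raise` the port returns the blocks
-- accumulated so far (those inputs are excluded by Pre_ below)
def parse_blocks_recursive (argv : List String) (keywords : List String) (blocks : List (String × List String)) (current_block : Option String) (filter_counter : Int) : List (String × List String) :=
  match argv with
  | [] => blocks
  | head :: tail =>
    if keywords.contains head then
      if blocks.any (fun p => p.1 = head) then blocks  -- raise ValueError (repeated keyword)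
      else if head = "filter" then
        let cb := head ++ PySem.Int.toStr filter_counter
        parse_blocks_recursive tail keywords (pbrInsert blocks cb []) (some cb) (filter_counter + 1)
      else
        parse_blocks_recursive tail keywords (pbrInsert blocks head []) (some head) filter_counter
    else
      match current_block with
      | some c => parse_blocks_recursive tail keywords (pbrAppend blocks c head) (some c) filter_counter
      | none => if head = "--help" then [] else blocks  -- raise ValueError (unexpected argument)

-- ===== PORT B =====
-- one step of B's for-loop; `Sum.inl` is an early exit (--help's `return {}`, or a raise,
-- where the port carries the blocks accumulated so far — excluded by Pre_)
def pbrStep (keywords : List String)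
    (st : (List (String × List String)) ⊕ (List (String × List String) × Option String × Int))
    (head : String) :
    (List (String × List String)) ⊕ (List (String × List String) × Option String × Int) :=
  match st with
  | Sum.inl r => Sum.inl r
  | Sum.inr (blocks, current_block, filter_counter) =>
    if keywords.contains head then
      if blocks.any (fun p => p.1 = head) then Sum.inl blocks  -- raise ValueError
      else
        let cb := if head = "filter" then head ++ PySem.Int.toStr filter_counter else head
        let fc := if head = "filter" then filter_counter + 1 else filter_counter
        Sum.inr (pbrInsert blocks cb [], some cb, fc)
    else
      match current_block with
      | some c => Sum.inr (pbrAppend blocks c head, some c, filter_counter)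
      | none => if head = "--help" then Sum.inl [] else Sum.inl blocks  -- raise ValueError

def parse_blocks_recursive_alt (argv : List String) (keywords : List String) (blocks : List (String × List String)) (current_block : Option String) (filter_counter : Int) : List (String × List String) :=
  match argv.foldl (pbrStep keywords) (Sum.inr (blocks, current_block, filter_counter)) with
  | Sum.inl r => r
  | Sum.inr (b, _, _) => b

-- ===== PRECONDITION & SPEC =====
def pbrKey (w : String) (c : Int) : String :=
  if w = "filter" then "filter" ++ PySem.Int.toStr c else w

def pbrNFilt (argv : List String) (keywords : List String) (m : Nat) : Nat :=
  ((argv.take m).filter (fun w => keywords.contains w && w == "filter")).length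

-- Pre_ excludes exactly the inputs on which the Python A raises (ValueError on a repeated
-- keyword or an unexpected argument, KeyError when current_block is not a key of blocks),
-- plus association lists with duplicate keys, which do not encode a Python dict.
def Pre_parse_blocks_recursive (argv : List String) (keywords : List String) (blocks : List (String × List String)) (current_block : Option String) (filter_counter : Int) : Prop :=
  (blocks.map Prod.fst).Nodup ∧
  ( (current_block = none ∧ argv ≠ [] ∧ keywords.contains (argv.getD 0 "") = false ∧
      argv.getD 0 "" = "--help")
  ∨ ( (current_block = none → argv = [] ∨ keywords.contains (argv.getD 0 "") = true)
    ∧ (∀ c, current_block = some c → argv ≠ [] →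
         keywords.contains (argv.getD 0 "") = false → c ∈ blocks.map Prod.fst)
    ∧ (∀ i, i < argv.length → keywords.contains (argv.getD i "") = true →
         argv.getD i "" ∉ blocks.map Prod.fst ∧
         ∀ m, m < i → keywords.contains (argv.getD m "") = true →
           pbrKey (argv.getD m "") (filter_counter + (pbrNFilt argv keywords m : Int))
             ≠ argv.getD i "") ) )

instance (argv : List String) (keywords : List String) (blocks : List (String × List String)) (current_block : Option String) (filter_counter : Int) : Decidable (Pre_parse_blocks_recursive argv keywords blocks current_block filter_counter) := by unfold Pre_parse_blocks_recursive; infer_instance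

def pvWitness_parse_blocks_recursive : List String × List String × (List (String × List String)) × Option String × Int :=
  (["filter", "x", "input", "y"], ["filter", "input"], [], none, 0)

def Spec_parse_blocks_recursive (argv : List String) (keywords : List String) (blocks : List (String × List String)) (current_block : Option String) (filter_counter : Int) (out : List (String × List String)) : Prop := out = parse_blocks_recursive_alt argv keywords blocks current_block filter_counter
instance (argv : List String) (keywords : List String) (blocks : List (String × List String)) (current_block : Option String) (filter_counter : Int) (out : List (String × List String)) : Decidable (Spec_parse_blocks_recursive argv keywords blocks current_block filter_counter out) := by unfold Spec_parse_blocks_recursive; infer_instance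

-- ===== CLAIM (what is proved, stated in full; the proofs are below) =====
def Claim_equal_parse_blocks_recursive : Prop := ∀ (argv : List String) (keywords : List String) (blocks : List (String × List String)) (current_block : Option String) (filter_counter : Int), Dom_parse_blocks_recursive argv keywords blocks current_block filter_counter → Pre_parse_blocks_recursive argv keywords blocks current_block filter_counter → Spec_parse_blocks_recursive argv keywords blocks current_block filter_counter (parse_blocks_recursive argv keywords blocks current_block filter_counter)

-- ===== LEMMAS AND PROOFS =====

-- once B's loop has exited early, the remaining iterations change nothing
theorem pbr_foldl_inl (keywords : List String) (l : List String)
    (r : List (String × List String)) :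
    l.foldl (pbrStep keywords) (Sum.inl r) = Sum.inl r := by
  induction l with
  | nil => rfl
  | cons h t ih => simpa [List.foldl, pbrStep] using ih

-- B's port on head :: tail = one loop step, then B's port on tail (or the early exit)
theorem pbr_alt_cons (keywords : List String) (head : String) (tail : List String)
    (blocks : List (String × List String)) (cb : Option String) (fc : Int) :
    parse_blocks_recursive_alt (head :: tail) keywords blocks cb fc =
      match pbrStep keywords (Sum.inr (blocks, cb, fc)) head with
      | Sum.inl r => r
      | Sum.inr (b, c, f) => parse_blocks_recursive_alt tail keywords b c f := by
  unfold parse_blocks_recursive_alt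
  rw [List.foldl_cons]
  cases h : pbrStep keywords (Sum.inr (blocks, cb, fc)) head with
  | inl r => rw [pbr_foldl_inl]
  | inr s => obtain ⟨b, c, f⟩ := s; rfl

-- the two ports agree on EVERY input (raise points included)
theorem pbr_agree (argv keywords : List String) (blocks : List (String × List String))
    (current_block : Option String) (filter_counter : Int) :
    parse_blocks_recursive argv keywords blocks current_block filter_counter
      = parse_blocks_recursive_alt argv keywords blocks current_block filter_counter := by
  induction argv generalizing blocks current_block filter_counter with
  | nil => rfl
  | cons head tail ih =>
    rw [pbr_alt_cons]
    simp only [parse_blocks_recursive, pbrStep]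
    by_cases hk : keywords.contains head = true
    · rw [if_pos hk, if_pos hk]
      by_cases hrep : (blocks.any fun p => p.1 = head) = true
      · rw [if_pos hrep, if_pos hrep]
      · rw [if_neg hrep, if_neg hrep]
        by_cases hf : head = "filter"
        · subst hf
          exact ih _ _ _
        · rw [if_neg hf]
          simp only [if_neg hf]
          exact ih _ _ _
    · rw [if_neg hk, if_neg hk]
      cases current_block with
      | some c => exact ih _ _ _
      | none =>
        by_cases hh : head = "--help"
        · rw [if_pos hh, if_pos hh]
        · rw [if_neg hh, if_neg hh]

-- ===== VERDICT (by name: the statement is the Claim_ definition above) =====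
theorem parse_blocks_recursive_spec : Claim_equal_parse_blocks_recursive := by
  intro argv keywords blocks current_block filter_counter _ _
  exact pbr_agree argv keywords blocks current_block filter_counter
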